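-- pv_equiv track=rewrite | github.com/sethirus/The-Thiele-Machine | scripts/honest_tseitin_benchmark.py | _xor3_to_cnf
-- ===== SOURCE A (Python) =====
-- from typing import Dict, List, Sequence, Tuple
--
-- def _xor3_to_cnf(x: int, y: int, z: int, charge: int) -> List[List[int]]:
--     """Convert x ⊕ y ⊕ z = charge into CNF clauses."""
--     if charge not in (0, 1):
--         raise ValueError("charge must be 0 or 1")
--     clauses: List[List[int]] = []
--     # Truth table expansion – four clauses cover the parity constraint.
--     combos = [
--         (True, True, True),
--         (True, True, False),
--         (True, False, True),
--         (True, False, False),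
--         (False, True, True),
--         (False, True, False),
--         (False, False, True),
--         (False, False, False),
--     ]
--     for a, b, c in combos:
--         parity = (a + b + c) % 2
--         satisfied = parity == charge
--         if satisfied:
--             continue  # satisfied rows impose no restriction
--         clause: List[int] = []
--         clause.append(x if a else -x)
--         clause.append(y if b else -y)
--         clause.append(z if c else -z)
--         clauses.append(clause)
--     return clauses
-- ===== SOURCE B (Python) =====
-- from typing import List
--
-- def _xor3_to_cnf(x: int, y: int, z: int, charge: int) -> List[List[int]]:
--     """Convert x ⊕ y ⊕ z = charge into CNF clauses (closed-form clause table)."""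
--     if charge not in (0, 1):
--         raise ValueError("charge must be 0 or 1")
--     if charge == 1:
--         return [[x, y, -z], [x, -y, z], [-x, y, z], [-x, -y, -z]]
--     return [[x, y, z], [x, -y, -z], [-x, y, -z], [-x, -y, z]]
-- ===== Notes on version B (the rewrite author's own statement) =====
-- stated objective: simpler
-- what changed: Replaces the 8-row truth-table enumeration with a direct closed-form return of the four falsifying clauses keyed on charge.
import Mathlib
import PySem

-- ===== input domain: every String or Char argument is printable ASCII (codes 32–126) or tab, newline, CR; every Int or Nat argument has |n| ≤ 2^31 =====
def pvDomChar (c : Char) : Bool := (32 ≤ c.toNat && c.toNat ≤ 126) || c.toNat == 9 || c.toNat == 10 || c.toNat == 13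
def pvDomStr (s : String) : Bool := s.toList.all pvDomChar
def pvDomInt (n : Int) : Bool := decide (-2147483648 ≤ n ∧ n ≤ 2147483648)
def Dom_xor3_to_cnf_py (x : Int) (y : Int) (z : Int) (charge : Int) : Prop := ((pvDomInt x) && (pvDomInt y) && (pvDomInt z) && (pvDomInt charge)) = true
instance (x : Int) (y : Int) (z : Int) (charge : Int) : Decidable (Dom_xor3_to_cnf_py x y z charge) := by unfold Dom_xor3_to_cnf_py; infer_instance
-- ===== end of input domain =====

-- B replaces A's 8-row truth-table enumeration with a closed-form clause table keyed on charge (objective: simpler).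
-- ===== PORT A =====
-- literal port of A: enumerate the 8 boolean rows, skip satisfied ones, emit a clause per unsatisfied row
def xor3_to_cnf_py (x : Int) (y : Int) (z : Int) (charge : Int) : List (List Int) :=
  let combos : List (Bool × Bool × Bool) :=
    [(true, true, true), (true, true, false), (true, false, true), (true, false, false),
     (false, true, true), (false, true, false), (false, false, true), (false, false, false)]
  combos.foldl (fun clauses abc =>
    let a := abc.1; let b := abc.2.1; let c := abc.2.2
    let parity : Int := ((if a then (1:Int) else 0) + (if b then (1:Int) else 0) + (if c then (1:Int) else 0)) % 2
    if parity = charge then clauses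
    else clauses ++ [[(if a then x else -x), (if b then y else -y), (if c then z else -z)]]) []

-- ===== PORT B =====
def xor3_to_cnf_py_alt (x : Int) (y : Int) (z : Int) (charge : Int) : List (List Int) :=
  if charge = 1 then [[x, y, -z], [x, -y, z], [-x, y, z], [-x, -y, -z]]
  else [[x, y, z], [x, -y, -z], [-x, y, -z], [-x, -y, z]]

-- ===== PRECONDITION & SPEC =====
-- Pre_ excludes exactly the inputs where A raises ValueError (charge outside {0,1}).
def Pre_xor3_to_cnf_py (x : Int) (y : Int) (z : Int) (charge : Int) : Prop := charge = 0 ∨ charge = 1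
instance (x : Int) (y : Int) (z : Int) (charge : Int) : Decidable (Pre_xor3_to_cnf_py x y z charge) := by unfold Pre_xor3_to_cnf_py; infer_instance
def pvWitness_xor3_to_cnf_py : Int × Int × Int × Int := (1, 2, 3, 1)
def Spec_xor3_to_cnf_py (x : Int) (y : Int) (z : Int) (charge : Int) (out : List (List Int)) : Prop := out = xor3_to_cnf_py_alt x y z charge
instance (x : Int) (y : Int) (z : Int) (charge : Int) (out : List (List Int)) : Decidable (Spec_xor3_to_cnf_py x y z charge out) := by unfold Spec_xor3_to_cnf_py; infer_instance

-- ===== CLAIM (what is proved, stated in full; the proofs are below) =====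
def Claim_equal_xor3_to_cnf_py : Prop := ∀ (x : Int) (y : Int) (z : Int) (charge : Int), Dom_xor3_to_cnf_py x y z charge → Pre_xor3_to_cnf_py x y z charge → Spec_xor3_to_cnf_py x y z charge (xor3_to_cnf_py x y z charge)

-- ===== LEMMAS AND PROOFS =====

-- ===== VERDICT (by name: the statement is the Claim_ definition above) =====
theorem xor3_to_cnf_py_spec : Claim_equal_xor3_to_cnf_py := by
  intro x y z charge _ hpre
  unfold Spec_xor3_to_cnf_py xor3_to_cnf_py xor3_to_cnf_py_alt
  rcases hpre with h | h <;> subst h <;> simp [List.foldl]
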